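-- pv_equiv track=rewrite | github.com/EdisonNi-hku/AFaCTA | code/afacta_multi_step_annotation.py | contextualize_sentences
-- ===== SOURCE A (Python) =====
-- def contextualize_sentences(sentences, window_size=1):
--     contexts = []
--     for i, sent in enumerate(sentences):
--         context = ""
--         for j in range(- window_size, 1 + window_size):
--             if 0 <= i + j < len(sentences):
--                 context += sentences[i + j] + ' '
--         contexts.append(context)
--     return contexts
-- ===== SOURCE B (Python) =====
-- def contextualize_sentences(sentences, window_size=1):
--     n = len(sentences)
--     def ctx(i):
--         start = max(0, i - window_size)
--         stop = max(start, min(n, i + window_size + 1))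
--         part = sentences[start:stop]
--         return ' '.join(part) + ' ' if part else ''
--     return [ctx(i) for i in range(n)]
-- ===== Notes on version B (the rewrite author's own statement) =====
-- stated objective: simpler
-- what changed: Replaces A's inner per-neighbour loop (bounds check and string += per neighbour) by computing clamped slice bounds, taking one slice, and joining it with spaces (plus a trailing space) per sentence.
import Mathlib
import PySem

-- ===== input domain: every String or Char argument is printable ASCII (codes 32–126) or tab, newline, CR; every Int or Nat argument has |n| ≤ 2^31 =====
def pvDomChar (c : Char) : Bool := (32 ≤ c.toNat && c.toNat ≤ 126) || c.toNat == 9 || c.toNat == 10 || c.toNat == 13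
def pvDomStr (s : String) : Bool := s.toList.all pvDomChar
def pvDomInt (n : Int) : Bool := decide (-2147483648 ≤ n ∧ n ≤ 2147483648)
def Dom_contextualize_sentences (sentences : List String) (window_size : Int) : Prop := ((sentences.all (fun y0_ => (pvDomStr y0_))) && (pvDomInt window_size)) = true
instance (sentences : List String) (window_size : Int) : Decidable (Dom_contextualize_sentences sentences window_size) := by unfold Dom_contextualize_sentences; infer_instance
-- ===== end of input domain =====

-- B replaces A's per-neighbour bounds-checked inner loop by slice-bound arithmetic plus a
-- single slice-and-join per sentence (objective: simpler).


-- ===== PORT A =====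
def contextualize_sentences (sentences : List String) (window_size : Int) : List String :=
  (PySem.List.enumerate sentences 0).foldl
    (fun contexts p =>
      let context :=
        (PySem.List.pyRange (-window_size) (1 + window_size) 1).foldl
          (fun context j =>
            if 0 ≤ p.1 + j ∧ p.1 + j < PySem.List.len sentences then
              context ++ PySem.List.pyGetD sentences (p.1 + j) "" ++ " "
            else context) ""
      contexts ++ [context]) []

-- ===== PORT B =====
def contextualize_sentences_alt (sentences : List String) (window_size : Int) : List String :=
  let n : Int := PySem.List.len sentences
  let ctx : Int → String := fun i =>
    let start := max 0 (i - window_size)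
    let stop := max start (min n (i + window_size + 1))
    let part := PySem.List.slice sentences (some start) (some stop)
    if part = [] then "" else PySem.Str.join " " part ++ " "
  (PySem.List.pyRange 0 n 1).map ctx

-- ===== PRECONDITION & SPEC =====
def Spec_contextualize_sentences (sentences : List String) (window_size : Int) (out : List String) : Prop := out = contextualize_sentences_alt sentences window_size
instance (sentences : List String) (window_size : Int) (out : List String) : Decidable (Spec_contextualize_sentences sentences window_size out) := by unfold Spec_contextualize_sentences; infer_instance

-- ===== CLAIM (what is proved, stated in full; the proofs are below) =====
def Claim_equal_contextualize_sentences : Prop := ∀ (sentences : List String) (window_size : Int), Dom_contextualize_sentences sentences window_size → Spec_contextualize_sentences sentences window_size (contextualize_sentences sentences window_size)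

-- ===== LEMMAS AND PROOFS =====

-- a foldl that only appends singletons is a map
theorem foldl_append_singleton {α β : Type} (f : α → β) (l : List α) (init : List β) :
    l.foldl (fun acc x => acc ++ [f x]) init = init ++ l.map f := by
  induction l generalizing init with
  | nil => simp
  | cons x xs ih => simp [List.foldl, ih]

-- mapping in-bounds indexing over a range is the slice
theorem map_pyGetD_eq_slice (xs : List String) (a b : Int) (d : String)
    (ha : 0 ≤ a) (hb0 : 0 ≤ b) (hb : a < b → b ≤ (xs.length : Int)) :
    (PySem.List.pyRange a b 1).map (fun j => PySem.List.pyGetD xs j d)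
      = PySem.List.slice xs (some a) (some b) := by
  rcases le_or_gt b a with h | h
  · rw [PySem.List.pyRange_one_eq_nil h]
    rw [PySem.List.slice_toNat _ ha hb0]
    have : b.toNat - a.toNat = 0 := by omega
    simp [this]
  · have hbl := hb h
    rw [PySem.List.slice_toNat _ ha hb0]
    apply List.ext_getElem
    · simp [PySem.List.length_pyRange_one]
      omega
    · intro k h1 h2
      simp only [PySem.List.length_pyRange_one, List.length_map] at h1
      simp only [List.getElem_map, PySem.List.getElem_pyRange_one]
      rw [List.getElem_take, List.getElem_drop]
      rw [PySem.List.pyGetD_eq_getElem]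
      · congr 1; omega
      · omega
      · omega

-- steps whose guard is false leave the accumulator unchanged
theorem foldl_guard_false {α : Type} (P : Int → Prop) [DecidablePred P]
    (g : α → Int → α) (l : List Int) (init : α) (h : ∀ x ∈ l, ¬ P x) :
    l.foldl (fun c x => if P x then g c x else c) init = init := by
  induction l generalizing init with
  | nil => rfl
  | cons x xs ih =>
    simp only [List.foldl]
    rw [if_neg (h x (by simp))]
    exact ih init (fun y hy => h y (by simp [hy]))

-- steps whose guard is always true are the unguarded steps
theorem foldl_guard_true {α : Type} (P : Int → Prop) [DecidablePred P]
    (g : α → Int → α) (l : List Int) (init : α) (h : ∀ x ∈ l, P x) :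
    l.foldl (fun c x => if P x then g c x else c) init = l.foldl g init := by
  induction l generalizing init with
  | nil => rfl
  | cons x xs ih =>
    simp only [List.foldl]
    rw [if_pos (h x (by simp))]
    exact ih _ (fun y hy => h y (by simp [hy]))

-- a guarded fold over a range equals the unguarded fold over the clamped range
theorem foldl_guard_clamp {α : Type} (g : α → Int → α) (a b n : Int) (init : α) :
    (PySem.List.pyRange a b 1).foldl
        (fun c k => if 0 ≤ k ∧ k < n then g c k else c) init
      = (PySem.List.pyRange (max 0 a) (max (max 0 a) (min n b)) 1).foldl g init := by
  set a' := max 0 a with ha'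
  set b' := max a' (min n b) with hb'
  rcases le_or_gt b a' with h | h
  · have hb'a' : b' = a' := by omega
    rw [hb'a', PySem.List.pyRange_one_eq_nil (le_refl a')]
    rcases le_or_gt b a with h2 | h2
    · rw [PySem.List.pyRange_one_eq_nil h2]; rfl
    · apply foldl_guard_false
      intro x hx
      rw [PySem.List.mem_pyRange_one] at hx
      omega
  · have h1 : a ≤ a' := by omega
    have h2 : a' ≤ b' := by omega
    have h3 : b' ≤ b := by omega
    rw [PySem.List.pyRange_one_append a a' b h1 (by omega),
        PySem.List.pyRange_one_append a' b' b h2 (by omega)]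
    rw [List.foldl_append, List.foldl_append]
    rw [foldl_guard_false _ _ _ _ (by intro x hx; rw [PySem.List.mem_pyRange_one] at hx; omega)]
    rw [foldl_guard_true _ _ _ _ (by intro x hx; rw [PySem.List.mem_pyRange_one] at hx; omega)]
    rw [foldl_guard_false _ _ _ _ (by intro x hx; rw [PySem.List.mem_pyRange_one] at hx; omega)]

-- shifting the index through a range fold
theorem foldl_pyRange_shift {α : Type} (F : α → Int → α) (i a b : Int) (init : α) :
    (PySem.List.pyRange a b 1).foldl (fun c j => F c (i + j)) init
      = (PySem.List.pyRange (i + a) (i + b) 1).foldl F init := by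
  rw [PySem.List.pyRange_one, PySem.List.pyRange_one, List.foldl_map, List.foldl_map]
  have hlen : (i + b - (i + a)).toNat = (b - a).toNat := by omega
  rw [hlen]
  have hfun : (fun (c : α) (k : Nat) => F c (i + (a + (k : Int))))
      = fun (c : α) (k : Nat) => F c (i + a + (k : Int)) := by
    funext c k
    rw [add_assoc]
  rw [hfun]

-- pulling the accumulator out of the space-append fold
theorem foldl_acc (l : List String) (acc : String) :
    l.foldl (fun c x => c ++ x ++ " ") acc = acc ++ l.foldl (fun c x => c ++ x ++ " ") "" := by
  induction l generalizing acc with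
  | nil => simp
  | cons x xs ih =>
    simp only [List.foldl]
    rw [ih ("" ++ x ++ " "), ih (acc ++ x ++ " ")]
    simp [String.append_assoc]

theorem str_join_cons_cons (x y : String) (ys : List String) :
    PySem.Str.join " " (x :: y :: ys) = x ++ " " ++ PySem.Str.join " " (y :: ys) := by
  simp only [PySem.Str.join, List.map_cons, PySem.Chars.join_cons_cons]
  rw [String.ofList_append, String.ofList_append]
  rw [String.ofList_toList]
  rfl

-- joining a non-empty list with spaces plus one trailing space is the accumulation loop
theorem join_space_eq_foldl (l : List String) (hl : l ≠ []) :
    PySem.Str.join " " l ++ " " = l.foldl (fun c x => c ++ x ++ " ") "" := by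
  induction l with
  | nil => simp at hl
  | cons x xs ih =>
    cases xs with
    | nil =>
      show _ = "" ++ x ++ " "
      simp only [String.empty_append]
      congr 1
      simp only [PySem.Str.join, List.map_cons, List.map_nil, PySem.Chars.join]
      simp [List.intercalate, List.intersperse, String.ofList_toList]
    | cons y ys =>
      rw [List.foldl_cons, foldl_acc, ← ih (by simp), str_join_cons_cons]
      simp [String.append_assoc]

-- the per-index context computed by A's inner loop equals B's slice-and-join
theorem inner_eq_ctx (sentences : List String) (w i : Int) :
    (PySem.List.pyRange (-w) (1 + w) 1).foldl
        (fun context j =>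
          if 0 ≤ i + j ∧ i + j < PySem.List.len sentences then
            context ++ PySem.List.pyGetD sentences (i + j) "" ++ " "
          else context) ""
      = (let start := max 0 (i - w)
         let stop := max start (min (PySem.List.len sentences) (i + w + 1))
         let part := PySem.List.slice sentences (some start) (some stop)
         if part = [] then "" else PySem.Str.join " " part ++ " ") := by
  simp only []
  rw [foldl_pyRange_shift
        (fun c k => if 0 ≤ k ∧ k < PySem.List.len sentences then
            c ++ PySem.List.pyGetD sentences k "" ++ " " else c) i (-w) (1 + w) ""]
  have e1 : i + -w = i - w := by ring
  have e2 : i + (1 + w) = i + w + 1 := by ring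
  rw [e1, e2]
  rw [foldl_guard_clamp (fun c k => c ++ PySem.List.pyGetD sentences k "" ++ " ")
        (i - w) (i + w + 1) (PySem.List.len sentences) ""]
  rw [show (fun (c : String) (k : Int) => c ++ PySem.List.pyGetD sentences k "" ++ " ")
        = fun c k => (fun c x => c ++ x ++ " ") c ((fun j => PySem.List.pyGetD sentences j "") k)
      from rfl]
  rw [← List.foldl_map (f := fun j => PySem.List.pyGetD sentences j "") (g := fun (c x : String) => c ++ x ++ " ")]
  rw [map_pyGetD_eq_slice sentences _ _ "" (by omega) (by omega)
        (by intro hlt; simp only [PySem.List.len_eq] at *; omega)]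
  set part := PySem.List.slice sentences (some (max 0 (i - w)))
      (some (max (max 0 (i - w)) (min (PySem.List.len sentences) (i + w + 1)))) with hpart
  by_cases hp : part = []
  · rw [if_pos hp, hp]; rfl
  · rw [if_neg hp, join_space_eq_foldl part hp]

-- ===== VERDICT (by name: the statement is the Claim_ definition above) =====
theorem contextualize_sentences_spec : Claim_equal_contextualize_sentences := by
  intro sentences w _hdom
  unfold Spec_contextualize_sentences contextualize_sentences contextualize_sentences_alt
  simp only []
  rw [foldl_append_singleton]
  rw [List.nil_append]
  have := PySem.List.map_fst_enumerate (xs := sentences) (s := 0)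
  calc (PySem.List.enumerate sentences 0).map _
      = ((PySem.List.enumerate sentences 0).map (·.1)).map
          (fun i => (PySem.List.pyRange (-w) (1 + w) 1).foldl
            (fun context j =>
              if 0 ≤ i + j ∧ i + j < PySem.List.len sentences then
                context ++ PySem.List.pyGetD sentences (i + j) "" ++ " "
              else context) "") := by rw [List.map_map]; rfl
    _ = (PySem.List.pyRange 0 (PySem.List.len sentences) 1).map
          (fun i => (PySem.List.pyRange (-w) (1 + w) 1).foldl
            (fun context j =>
              if 0 ≤ i + j ∧ i + j < PySem.List.len sentences then
                context ++ PySem.List.pyGetD sentences (i + j) "" ++ " "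
              else context) "") := by
            rw [this]; simp [PySem.List.len_eq]
    _ = _ := by
          apply List.map_congr_left
          intro i _hi
          exact inner_eq_ctx sentences w i
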